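-- pv_equiv track=rewrite | github.com/colin-raaen/CS50x | Week 6/sentimental-readability/readability.py | string_counts
-- ===== SOURCE A (Python) =====
-- def string_counts(a):
--     letter_counter = 0
--     word_counter = 0
--     sentence_counter = 0
--     # loop through phrases counting letters words and sentences
--     for i in range(len(a)):
--         # Count letter if alpha
--         if a[i].isalpha():
--             letter_counter += 1
--         # assess if end of string
--         elif i == len(a) - 1:
--             # if ends with quotation only count word
--             if a[i] == '"':
--                 word_counter += 1
--             # else must be end of word and sentence
--             else:
--                 word_counter += 1
--                 sentence_counter += 1
--         # count spaces as words
--         elif a[i].isspace():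
--             word_counter += 1
--         # count punctuation as sentences
--         elif a[i] == '.' or a[i] == '!' or a[i] == '?':
--             sentence_counter += 1
--     return letter_counter, word_counter, sentence_counter
-- ===== SOURCE B (Python) =====
-- def string_counts(a):
--     # Different decomposition: guard empty string, three separate tallies over
--     # the body a[:-1], then the last-character rule applied once.
--     if not a:
--         return (0, 0, 0)
--     letters = sum(1 for c in a if c.isalpha())
--     body = a[:-1]
--     words = sum(1 for c in body if c.isspace())
--     sentences = sum(1 for c in body if c in '.!?')
--     last = a[-1]
--     if last.isalpha():
--         pass
--     elif last == '"':
--         words += 1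
--     else:
--         words += 1
--         sentences += 1
--     return letters, words, sentences
-- ===== Notes on version B (the rewrite author's own statement) =====
-- stated objective: simpler
-- what changed: Replaces the single index-based loop with its position-dependent branch cascade by an empty-string guard, three independent tallies (letters over the whole string, whitespace and sentence punctuation over the body a[:-1]) and one explicit last-character rule.
import Mathlib
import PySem

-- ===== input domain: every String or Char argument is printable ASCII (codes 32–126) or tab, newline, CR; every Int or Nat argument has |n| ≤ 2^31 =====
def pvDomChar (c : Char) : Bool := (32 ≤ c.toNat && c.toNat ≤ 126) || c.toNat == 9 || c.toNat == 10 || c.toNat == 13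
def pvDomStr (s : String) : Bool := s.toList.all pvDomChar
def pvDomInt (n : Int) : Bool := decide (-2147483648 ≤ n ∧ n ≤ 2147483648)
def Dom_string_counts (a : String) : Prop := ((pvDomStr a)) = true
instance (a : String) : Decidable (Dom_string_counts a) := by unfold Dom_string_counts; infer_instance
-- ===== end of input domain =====

-- B replaces A's single indexed loop with an empty-string guard, three separate tallies
-- (letters over the whole string, spaces/punctuation over the body) and one last-character rule.


-- ===== PORT A =====
-- the for-loop over range(len(a)): index i, remaining suffix of the string, state (letters, words, sentences)
def string_counts_loop (n : Nat) : Nat → List Char → Int × Int × Int → Int × Int × Int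
  | _, [], s => s
  | i, c :: rest, (l, w, sn) =>
    string_counts_loop n (i + 1) rest
      (if PySem.Chars.isalpha c then (l + 1, w, sn)
       else if i = n - 1 then
         (if c = '"' then (l, w + 1, sn) else (l, w + 1, sn + 1))
       else if PySem.Chars.isspace c then (l, w + 1, sn)
       else if c = '.' ∨ c = '!' ∨ c = '?' then (l, w, sn + 1)
       else (l, w, sn))

def string_counts (a : String) : Int × Int × Int :=
  string_counts_loop a.toList.length 0 a.toList (0, 0, 0)

-- ===== PORT B =====
def string_counts_alt (a : String) : Int × Int × Int :=
  let cs := a.toList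
  if cs.isEmpty then (0, 0, 0)
  else
    let letters : Int := cs.countP PySem.Chars.isalpha
    let body := cs.dropLast
    let words : Int := body.countP PySem.Chars.isspace
    let sentences : Int := body.countP (fun c => c = '.' || c = '!' || c = '?')
    let last := cs.getLast!
    if PySem.Chars.isalpha last then (letters, words, sentences)
    else if last = '"' then (letters, words + 1, sentences)
    else (letters, words + 1, sentences + 1)

-- ===== PRECONDITION & SPEC =====
def Spec_string_counts (a : String) (out : Int × Int × Int) : Prop := out = string_counts_alt a
instance (a : String) (out : Int × Int × Int) : Decidable (Spec_string_counts a out) := by unfold Spec_string_counts; infer_instance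

-- ===== CLAIM (what is proved, stated in full; the proofs are below) =====
def Claim_equal_string_counts : Prop := ∀ (a : String), Dom_string_counts a → Spec_string_counts a (string_counts a)

-- ===== LEMMAS AND PROOFS =====

-- proof-side helper: per-string tallies, recursively over the characters
def pvTallies : List Char → Int × Int × Int
  | [] => (0, 0, 0)
  | [c] =>
    if PySem.Chars.isalpha c then (1, 0, 0)
    else if c = '"' then (0, 1, 0) else (0, 1, 1)
  | c :: d :: rest =>
    let t := pvTallies (d :: rest)
    if PySem.Chars.isalpha c then (t.1 + 1, t.2.1, t.2.2)
    else if PySem.Chars.isspace c then (t.1, t.2.1 + 1, t.2.2)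
    else if c = '.' ∨ c = '!' ∨ c = '?' then (t.1, t.2.1, t.2.2 + 1)
    else t

lemma alpha_not_space (c : Char) (h : PySem.Chars.isalpha c = true) :
    PySem.Chars.isspace c = false := by
  have hA : 'A'.val.toNat = 65 := rfl
  have hZ : 'Z'.val.toNat = 90 := rfl
  have ha : 'a'.val.toNat = 97 := rfl
  have hz : 'z'.val.toNat = 122 := rfl
  unfold PySem.Chars.isalpha PySem.Chars.isupper PySem.Chars.islower PySem.Chars.isspace at *
  simp only [Char.le_def, UInt32.le_iff_toNat_le, Char.toNat, Bool.or_eq_true, Bool.and_eq_true,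
    decide_eq_true_eq, Bool.or_eq_false_iff, Bool.and_eq_false_iff, decide_eq_false_iff_not,
    hA, hZ, ha, hz] at *
  omega

lemma alpha_not_punct (c : Char) (h : PySem.Chars.isalpha c = true) :
    (decide (c = '.') || decide (c = '!') || decide (c = '?')) = false := by
  simp only [Bool.or_eq_false_iff, decide_eq_false_iff_not]
  refine ⟨⟨?_, ?_⟩, ?_⟩ <;> rintro rfl <;> exact absurd h (by decide)

lemma space_not_punct (c : Char) (h : PySem.Chars.isspace c = true) :
    (decide (c = '.') || decide (c = '!') || decide (c = '?')) = false := by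
  simp only [Bool.or_eq_false_iff, decide_eq_false_iff_not]
  refine ⟨⟨?_, ?_⟩, ?_⟩ <;> rintro rfl <;> exact absurd h (by decide)

lemma string_counts_loop_eq (rest : List Char) :
    ∀ (n i : Nat) (l w sn : Int), i + rest.length = n →
      string_counts_loop n i rest (l, w, sn) =
        (l + (pvTallies rest).1, w + (pvTallies rest).2.1, sn + (pvTallies rest).2.2) := by
  induction rest with
  | nil => intro n i l w sn h; simp [string_counts_loop, pvTallies]
  | cons c rest ih =>
    intro n i l w sn h
    cases rest with
    | nil =>
      have hi : i = n - 1 := by simp at h; omega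
      simp only [string_counts_loop, pvTallies, hi, if_true]
      split_ifs <;> simp
    | cons d t =>
      have hi : ¬ (i = n - 1) := by simp at h; omega
      have hlen : (i + 1) + (d :: t).length = n := by simp at h ⊢; omega
      have step1 : string_counts_loop n i (c :: d :: t) (l, w, sn) =
          string_counts_loop n (i + 1) (d :: t)
            (if PySem.Chars.isalpha c then (l + 1, w, sn)
             else if i = n - 1 then
               (if c = '"' then (l, w + 1, sn) else (l, w + 1, sn + 1))
             else if PySem.Chars.isspace c then (l, w + 1, sn)
             else if c = '.' ∨ c = '!' ∨ c = '?' then (l, w, sn + 1)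
             else (l, w, sn)) := rfl
      rw [step1]
      by_cases h1 : PySem.Chars.isalpha c = true
      · rw [if_pos h1, ih n (i + 1) _ _ _ hlen]
        have e : pvTallies (c :: d :: t) =
            ((pvTallies (d :: t)).1 + 1, (pvTallies (d :: t)).2.1, (pvTallies (d :: t)).2.2) := by
          simp only [pvTallies]; rw [if_pos h1]
        rw [e]; simp [Prod.mk.injEq]; omega
      · rw [if_neg h1, if_neg hi]
        by_cases h2 : PySem.Chars.isspace c = true
        · rw [if_pos h2, ih n (i + 1) _ _ _ hlen]
          have e : pvTallies (c :: d :: t) =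
              ((pvTallies (d :: t)).1, (pvTallies (d :: t)).2.1 + 1, (pvTallies (d :: t)).2.2) := by
            simp only [pvTallies]; rw [if_neg h1, if_pos h2]
          rw [e]; simp [Prod.mk.injEq]; omega
        · rw [if_neg h2]
          by_cases h3 : c = '.' ∨ c = '!' ∨ c = '?'
          · rw [if_pos h3, ih n (i + 1) _ _ _ hlen]
            have e : pvTallies (c :: d :: t) =
                ((pvTallies (d :: t)).1, (pvTallies (d :: t)).2.1, (pvTallies (d :: t)).2.2 + 1) := by
              simp only [pvTallies]; rw [if_neg h1, if_neg h2, if_pos h3]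
            rw [e]; simp [Prod.mk.injEq]; omega
          · rw [if_neg h3, ih n (i + 1) _ _ _ hlen]
            have e : pvTallies (c :: d :: t) = pvTallies (d :: t) := by
              simp only [pvTallies]; rw [if_neg h1, if_neg h2, if_neg h3]
            rw [e]

lemma pvTallies_eq_alt (cs : List Char) (h : cs ≠ []) :
    pvTallies cs =
      ((cs.countP PySem.Chars.isalpha : Int),
       ((cs.dropLast.countP PySem.Chars.isspace : Int) +
          (if PySem.Chars.isalpha cs.getLast! then 0 else 1)),
       ((cs.dropLast.countP (fun c => c = '.' || c = '!' || c = '?') : Int) +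
          (if PySem.Chars.isalpha cs.getLast! then 0
           else if cs.getLast! = '"' then 0 else 1))) := by
  induction cs with
  | nil => exact absurd rfl h
  | cons c rest ih =>
    cases rest with
    | nil =>
      simp only [pvTallies]
      split_ifs <;> simp_all [List.getLast!]
    | cons d t =>
      have hne : d :: t ≠ [] := by simp
      have hlast : (c :: d :: t).getLast! = (d :: t).getLast! := by
        simp [List.getLast!]
      have hdrop : (c :: d :: t).dropLast = c :: (d :: t).dropLast := by simp
      by_cases h1 : PySem.Chars.isalpha c = true
      · have hs := alpha_not_space c h1
        have hp := alpha_not_punct c h1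
        have e : pvTallies (c :: d :: t) =
            ((pvTallies (d :: t)).1 + 1, (pvTallies (d :: t)).2.1, (pvTallies (d :: t)).2.2) := by
          simp only [pvTallies]; rw [if_pos h1]
        rw [e, ih hne, hlast, hdrop]
        simp [List.countP_cons, h1, hs, hp]
      · have ha : PySem.Chars.isalpha c = false := by simpa using h1
        by_cases h2 : PySem.Chars.isspace c = true
        · have hp := space_not_punct c h2
          have e : pvTallies (c :: d :: t) =
              ((pvTallies (d :: t)).1, (pvTallies (d :: t)).2.1 + 1, (pvTallies (d :: t)).2.2) := by
            simp only [pvTallies]; rw [if_neg h1, if_pos h2]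
          rw [e, ih hne, hlast, hdrop]
          simp [List.countP_cons, ha, h2, hp, Prod.mk.injEq]
          split_ifs <;> omega
        · have hs : PySem.Chars.isspace c = false := by simpa using h2
          by_cases h3 : c = '.' ∨ c = '!' ∨ c = '?'
          · have hp : (decide (c = '.') || decide (c = '!') || decide (c = '?')) = true := by
              rcases h3 with rfl | rfl | rfl <;> decide
            have e : pvTallies (c :: d :: t) =
                ((pvTallies (d :: t)).1, (pvTallies (d :: t)).2.1, (pvTallies (d :: t)).2.2 + 1) := by
              simp only [pvTallies]; rw [if_neg h1, if_neg h2, if_pos h3]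
            rw [e, ih hne, hlast, hdrop]
            simp [List.countP_cons, ha, hs, hp, Prod.mk.injEq]
            split_ifs <;> omega
          · have hp : (decide (c = '.') || decide (c = '!') || decide (c = '?')) = false := by
              push Not at h3
              simp [h3.1, h3.2.1, h3.2.2]
            have e : pvTallies (c :: d :: t) = pvTallies (d :: t) := by
              simp only [pvTallies]; rw [if_neg h1, if_neg h2, if_neg h3]
            rw [e, ih hne, hlast, hdrop]
            simp [List.countP_cons, ha, hs, hp]

-- ===== VERDICT (by name: the statement is the Claim_ definition above) =====
theorem string_counts_spec : Claim_equal_string_counts := by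
  intro a _
  show string_counts a = string_counts_alt a
  unfold string_counts string_counts_alt
  cases hcs : a.toList with
  | nil => simp [string_counts_loop]
  | cons c rest =>
    rw [string_counts_loop_eq (c :: rest) _ 0 0 0 0 (by simp)]
    rw [pvTallies_eq_alt (c :: rest) (by simp)]
    simp only [List.isEmpty_cons, List.getLast!, Bool.false_eq_true, if_false]
    split_ifs <;> simp
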